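-- pv_equiv track=rewrite | github.com/VanOFiuza/ProgMulti_Python | Exercicios12.py | contem_parQ
-- ===== SOURCE A (Python) =====
-- def contem_parQ(w) :
--     if len(w)==0:
--         return False
--     else :
--         n = w.pop()
--         if n%2 == 0 :
--             return True
--         else :
--             return contem_parQ(w)
-- ===== SOURCE B (Python) =====
-- def contem_parQ(w):
--     # Iterative loop replacing A's recursion; keeps the same pop-from-end mutation.
--     while len(w) != 0:
--         if w.pop() % 2 == 0:
--             return True
--     return False
-- ===== Notes on version B (the rewrite author's own statement) =====
-- stated objective: simpler
-- what changed: Replaces A's self-recursion (one Python stack frame per element, risking RecursionError on long lists) with a plain while loop that pops from the end, preserving the same mutation of w.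
import Mathlib
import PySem

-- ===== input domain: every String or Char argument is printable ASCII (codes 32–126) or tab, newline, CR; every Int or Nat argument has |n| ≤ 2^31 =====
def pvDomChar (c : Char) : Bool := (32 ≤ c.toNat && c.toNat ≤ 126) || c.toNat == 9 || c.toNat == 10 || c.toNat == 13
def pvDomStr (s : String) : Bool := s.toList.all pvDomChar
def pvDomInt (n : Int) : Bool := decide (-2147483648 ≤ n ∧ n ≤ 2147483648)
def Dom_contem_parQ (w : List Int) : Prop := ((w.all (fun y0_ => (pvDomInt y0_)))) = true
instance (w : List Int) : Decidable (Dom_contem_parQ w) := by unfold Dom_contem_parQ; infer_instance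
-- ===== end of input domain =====

-- B replaces A's recursion by an iterative pop-from-end loop; both mutate w the same way
-- (elements popped from the back until an even one is found); equivalence is about the return value.

-- ===== PORT A =====
-- literal port of A: empty check, pop last element, test n % 2 == 0, else recurse on the rest
def contem_parQ (w : List Int) : Bool :=
  if w.length == 0 then
    false
  else
    match h : PySem.List.pop? w (-1) with
    | none => false  -- unreachable: w nonempty
    | some (n, rest) =>
      if PySem.Int.mod n 2 == 0 then true
      else contem_parQ rest
termination_by w.length
decreasing_by
  have h2 := PySem.List.length_of_pop?_eq_some w h
  simp at h2
  omega

-- ===== PORT B =====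
-- literal port of B: the while loop consumes w from the back, i.e. walks w.reverse front-to-back
def contem_parQ_altLoop : List Int → Bool
  | [] => false
  | n :: rest => if PySem.Int.mod n 2 == 0 then true else contem_parQ_altLoop rest

def contem_parQ_alt (w : List Int) : Bool := contem_parQ_altLoop w.reverse

-- ===== PRECONDITION & SPEC =====
def Spec_contem_parQ (w : List Int) (out : Bool) : Prop := out = contem_parQ_alt w
instance (w : List Int) (out : Bool) : Decidable (Spec_contem_parQ w out) := by unfold Spec_contem_parQ; infer_instance

-- ===== CLAIM (what is proved, stated in full; the proofs are below) =====
def Claim_equal_contem_parQ : Prop := ∀ (w : List Int), Dom_contem_parQ w → Spec_contem_parQ w (contem_parQ w)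

-- ===== LEMMAS AND PROOFS =====
lemma contem_parQ_eq_loop (w : List Int) : contem_parQ w = contem_parQ_altLoop w.reverse := by
  induction w using List.reverseRecOn with
  | nil => rw [contem_parQ.eq_def]; simp [contem_parQ_altLoop]
  | append_singleton xs n ih =>
    rw [contem_parQ.eq_def, PySem.List.pop?_last]
    simp only [List.reverse_append, List.reverse_singleton, List.singleton_append,
      contem_parQ_altLoop, List.length_append, List.length_singleton]
    split <;> simp_all

-- ===== VERDICT (by name: the statement is the Claim_ definition above) =====
theorem contem_parQ_spec : Claim_equal_contem_parQ := by
  intro w _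
  unfold Spec_contem_parQ contem_parQ_alt
  exact contem_parQ_eq_loop w
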